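-- pv_equiv track=rewrite | github.com/tgkei/Algorithm_study | by_python/line/2021/1.py | solution
-- ===== SOURCE A (Python) =====
-- def solution(boxes):
--     answer = 0
--
--     n = len(boxes)
--
--     present = dict()
--     total = 0
--     for box1, box2 in boxes:
--         if box1 in present:
--             if present[box1]:
--                 total += 1
--                 present[box1] = 0
--             else:
--                 present[box1] = 1
--         else:
--             present[box1] = 1
--
--         if box2 in present:
--             if present[box2]:
--                 total += 1
--                 present[box2] = 0
--             else:
--                 present[box2] = 1
--         else:
--             present[box2] = 1
--
--     needed = n - total
--
--     for v in present.values():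
--         if needed > 0 and v:
--             needed -= 1
--             answer += 1
--
--     return answer
-- ===== SOURCE B (Python) =====
-- def solution(boxes):
--     counts = {}
--     for box1, box2 in boxes:
--         counts[box1] = counts.get(box1, 0) + 1
--         counts[box2] = counts.get(box2, 0) + 1
--     odd = 0
--     for c in counts.values():
--         if c % 2 == 1:
--             odd += 1
--     return odd // 2
-- ===== Notes on version B (the rewrite author's own statement) =====
-- stated objective: simpler
-- what changed: Replaces A's toggle-flag dict with running total plus a second capped min-selection loop by a plain occurrence counter followed by counting odd-count values and returning odd//2, which provably equals A's answer.
import Mathlib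
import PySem

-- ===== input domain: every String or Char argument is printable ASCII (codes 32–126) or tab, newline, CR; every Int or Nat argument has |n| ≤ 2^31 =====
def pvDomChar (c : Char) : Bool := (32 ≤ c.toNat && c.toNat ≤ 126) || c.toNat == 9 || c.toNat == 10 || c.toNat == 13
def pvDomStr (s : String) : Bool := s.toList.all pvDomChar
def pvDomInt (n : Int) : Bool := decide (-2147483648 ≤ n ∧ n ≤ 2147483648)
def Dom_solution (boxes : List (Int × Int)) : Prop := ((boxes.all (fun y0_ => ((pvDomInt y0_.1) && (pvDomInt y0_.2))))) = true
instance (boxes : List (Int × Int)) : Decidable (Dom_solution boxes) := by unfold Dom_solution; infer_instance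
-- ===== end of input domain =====

-- B replaces A's toggle-flag dict + total and its second capped selection loop by a plain
-- occurrence counter and a parity count (odd//2): simpler, provably the same answer.

-- ===== PORT A =====
-- one 'box in present' toggle step of A's first loop (run for box1, then box2)
def touchA (st : PySem.Dict Int Int × Int) (x : Int) : PySem.Dict Int Int × Int :=
  match st.1.get? x with
  | some v => if v ≠ 0 then (st.1.insert x 0, st.2 + 1) else (st.1.insert x 1, st.2)
  | none => (st.1.insert x 1, st.2)

def solution (boxes : List (Int × Int)) : Int :=
  let n : Int := (boxes.length : Int)
  let st := boxes.foldl (fun st p => touchA (touchA st p.1) p.2) (PySem.Dict.empty, (0 : Int))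
  let needed : Int := n - st.2
  (st.1.values.foldl
    (fun (s : Int × Int) v => if 0 < s.1 ∧ v ≠ 0 then (s.1 - 1, s.2 + 1) else s)
    (needed, 0)).2

-- ===== PORT B =====
-- counts[x] = counts.get(x, 0) + 1
def incB (d : PySem.Dict Int Int) (x : Int) : PySem.Dict Int Int :=
  d.insert x (d.getD x 0 + 1)

def solution_alt (boxes : List (Int × Int)) : Int :=
  let counts := boxes.foldl (fun d p => incB (incB d p.1) p.2) PySem.Dict.empty
  let odd : Int := counts.values.foldl
    (fun acc c => if PySem.Int.mod c 2 = 1 then acc + 1 else acc) 0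
  PySem.Int.floordiv odd 2

-- ===== PRECONDITION & SPEC =====
def Spec_solution (boxes : List (Int × Int)) (out : Int) : Prop := out = solution_alt boxes
instance (boxes : List (Int × Int)) (out : Int) : Decidable (Spec_solution boxes out) := by unfold Spec_solution; infer_instance

-- ===== CLAIM (what is proved, stated in full; the proofs are below) =====
def Claim_equal_solution : Prop := ∀ (boxes : List (Int × Int)), Dom_solution boxes → Spec_solution boxes (solution boxes)

-- ===== LEMMAS AND PROOFS =====

-- a loop doing two updates per pair is the fold over the flattened element list
lemma pairFold {σ : Type} (g : σ → Int → σ) (boxes : List (Int × Int)) (init : σ) :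
    boxes.foldl (fun st p => g (g st p.1) p.2) init
      = (boxes.flatMap (fun p => [p.1, p.2])).foldl g init := by
  induction boxes generalizing init with
  | nil => rfl
  | cons p rest ih => simp [List.foldl_cons, ih]

lemma length_flatMap_pair (boxes : List (Int × Int)) :
    (boxes.flatMap (fun p => [p.1, p.2])).length = 2 * boxes.length := by
  induction boxes with
  | nil => rfl
  | cons p rest ih => simp [ih]; omega

-- replacing the (unique) entry at key x changes the nonzero-value count by the obvious delta
lemma countNZ_replace (l : List (Int × Int)) (x w k : Int)
    (hmem : (x, k) ∈ l) (hnd : (l.map (·.1)).Nodup) :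
    ((l.map (fun p => if p.1 == x then (x, w) else p)).map (·.2)).countP (fun v => decide (v ≠ 0))
      + (if k ≠ 0 then 1 else 0)
    = (l.map (·.2)).countP (fun v => decide (v ≠ 0)) + (if w ≠ 0 then 1 else 0) := by
  induction l with
  | nil => simp at hmem
  | cons p rest ih =>
    rw [List.map_cons, List.nodup_cons] at hnd
    obtain ⟨hx, hndr⟩ := hnd
    by_cases hpx : p.1 = x
    · have hxm : x ∉ rest.map (·.1) := hpx ▸ hx
      have hpk : p = (x, k) := by
        rcases List.mem_cons.mp hmem with h | h
        · exact h.symm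
        · exact absurd (List.mem_map.mpr ⟨(x, k), h, rfl⟩) hxm
      have htail : rest.map (fun q => if q.1 == x then (x, w) else q) = rest := by
        have hcg : ∀ q ∈ rest, (if q.1 == x then (x, w) else q) = id q := by
          intro q hq
          have hq1 : q.1 ≠ x := fun he => hxm (he ▸ List.mem_map.mpr ⟨q, hq, rfl⟩)
          simp [hq1]
        rw [List.map_congr_left hcg, List.map_id]
      subst hpk
      simp only [List.map_cons, htail, beq_self_eq_true, if_true, List.countP_cons]
      by_cases hw : w ≠ 0 <;> by_cases hk : k ≠ 0 <;> simp [hw, hk]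
    · have hmem' : (x, k) ∈ rest := by
        rcases List.mem_cons.mp hmem with h | h
        · exact absurd (congrArg Prod.fst h).symm hpx
        · exact h
      have hrec := ih hmem' hndr
      simp only [List.map_cons, List.countP_cons] at hrec ⊢
      simp [hpx] at hrec ⊢
      omega

-- lookup in a value-mapped dict
lemma get?_mapVal (c : PySem.Dict Int Int) (f : Int → Int) (x : Int) :
    (PySem.Dict.mk (c.items.map (fun p => (p.1, f p.2)))).get? x
      = (c.get? x).map f := by
  rcases c with ⟨l⟩
  induction l with
  | nil => simp [PySem.Dict.get?]
  | cons p rest ih =>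
    obtain ⟨a, b⟩ := p
    simp only [List.map_cons, PySem.Dict.get?_mk_cons] at ih ⊢
    by_cases h : a == x
    · simp [h]
    · simp [h, ih]

-- one touch of A kept in lockstep with one increment of B:
-- A's dict stores B's counts mod 2, and 2*total + (#nonzero A-values) grows by 1 per touch
lemma stepAB (d : PySem.Dict Int Int) (t x : Int) (c : PySem.Dict Int Int)
    (hrel : d.items = c.items.map (fun p => (p.1, PySem.Int.mod p.2 2)))
    (hnd : c.keys.Nodup) :
    (touchA (d, t) x).1.items = (incB c x).items.map (fun p => (p.1, PySem.Int.mod p.2 2))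
    ∧ (incB c x).keys.Nodup
    ∧ 2 * (touchA (d, t) x).2 + ((touchA (d, t) x).1.values.countP (fun v => decide (v ≠ 0)) : Int)
        = 2 * t + (d.values.countP (fun v => decide (v ≠ 0)) : Int) + 1 := by
  have hnodup' : (incB c x).keys.Nodup := PySem.Dict.nodup_keys_insert c x _ hnd
  have hd : d = PySem.Dict.mk (c.items.map (fun p => (p.1, PySem.Int.mod p.2 2))) :=
    PySem.Dict.ext hrel
  have hget : d.get? x = (c.get? x).map (fun v => PySem.Int.mod v 2) := by
    rw [hd]; exact get?_mapVal c (fun v => PySem.Int.mod v 2) x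
  cases hc : c.get? x with
  | none =>
    have hcc : c.contains x = false := by rw [PySem.Dict.contains_eq_isSome_get? c x, hc]; rfl
    have hdg : d.get? x = none := by rw [hget, hc]; rfl
    have hdc : d.contains x = false := by rw [PySem.Dict.contains_eq_isSome_get? d x, hdg]; rfl
    have hgD : c.getD x 0 = 0 := PySem.Dict.getD_of_not_contains c 0 hcc
    refine ⟨?_, hnodup', ?_⟩
    · simp only [touchA, incB, hdg, hgD]
      rw [PySem.Dict.items_insert_of_not_contains d 1 hdc,
        PySem.Dict.items_insert_of_not_contains c (0 + 1) hcc, List.map_append, hrel]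
      norm_num
    · simp only [touchA, hdg]
      simp only [PySem.Dict.values, PySem.Dict.items_insert_of_not_contains d 1 hdc,
        List.map_append, List.countP_append]
      norm_num
      omega
  | some k =>
    have hcc : c.contains x = true := by rw [PySem.Dict.contains_eq_isSome_get? c x, hc]; rfl
    have hdg : d.get? x = some (PySem.Int.mod k 2) := by rw [hget, hc]; rfl
    have hdc : d.contains x = true := by rw [PySem.Dict.contains_eq_isSome_get? d x, hdg]; rfl
    have hgD : c.getD x 0 = k := PySem.Dict.getD_of_get?_eq_some c 0 hc
    have hmem : (x, PySem.Int.mod k 2) ∈ d.items := PySem.Dict.mem_items_of_get?_eq_some d hdg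
    have hdnd : (d.items.map (·.1)).Nodup := by
      have h1 : d.items.map (·.1) = c.items.map (·.1) := by
        rw [hrel, List.map_map]; rfl
      rw [h1]
      simpa [PySem.Dict.keys] using hnd
    have hm : PySem.Int.mod k 2 = k % 2 := PySem.Int.mod_eq_emod_of_pos (by omega)
    have hm' : PySem.Int.mod (k + 1) 2 = (k + 1) % 2 :=
      PySem.Int.mod_eq_emod_of_pos (by omega)
    by_cases h01 : PySem.Int.mod k 2 = 0
    · -- even count so far: A writes 1, total unchanged
      have hk2 : k % 2 = 0 := by rw [← hm]; exact h01
      refine ⟨?_, hnodup', ?_⟩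
      · simp only [touchA, incB, hdg, hgD, h01]
        norm_num
        rw [PySem.Dict.items_insert_of_contains d 1 hdc,
          PySem.Dict.items_insert_of_contains c (k + 1) hcc, hrel, List.map_map, List.map_map]
        refine List.map_congr_left ?_
        intro p _
        by_cases hpx : p.1 = x <;> simp [hpx] <;> omega
      · have hcnt := countNZ_replace d.items x 1 (PySem.Int.mod k 2) hmem hdnd
        rw [h01] at hcnt
        norm_num at hcnt
        simp only [touchA, hdg, h01]
        norm_num
        simp only [PySem.Dict.values, PySem.Dict.items_insert_of_contains d 1 hdc]
        norm_num
        omega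
    · -- odd count so far: A writes 0 and counts it into total
      have hk2 : k % 2 = 1 := by
        rw [hm] at h01; omega
      have h1 : PySem.Int.mod k 2 = 1 := by rw [hm]; exact hk2
      refine ⟨?_, hnodup', ?_⟩
      · simp only [touchA, incB, hdg, hgD, h1]
        norm_num
        rw [PySem.Dict.items_insert_of_contains d 0 hdc,
          PySem.Dict.items_insert_of_contains c (k + 1) hcc, hrel, List.map_map, List.map_map]
        refine List.map_congr_left ?_
        intro p _
        by_cases hpx : p.1 = x <;> simp [hpx] <;> omega
      · have hcnt := countNZ_replace d.items x 0 (PySem.Int.mod k 2) hmem hdnd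
        rw [h1] at hcnt
        norm_num at hcnt
        simp only [touchA, hdg, h1]
        norm_num
        simp only [PySem.Dict.values, PySem.Dict.items_insert_of_contains d 0 hdc]
        norm_num
        omega

-- the invariant pushed through a whole touch sequence
lemma invAB (xs : List Int) (d : PySem.Dict Int Int) (t : Int) (c : PySem.Dict Int Int)
    (hrel : d.items = c.items.map (fun p => (p.1, PySem.Int.mod p.2 2)))
    (hnd : c.keys.Nodup) :
    (xs.foldl touchA (d, t)).1.items
        = (xs.foldl incB c).items.map (fun p => (p.1, PySem.Int.mod p.2 2))
    ∧ (xs.foldl incB c).keys.Nodup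
    ∧ 2 * (xs.foldl touchA (d, t)).2
        + ((xs.foldl touchA (d, t)).1.values.countP (fun v => decide (v ≠ 0)) : Int)
      = 2 * t + (d.values.countP (fun v => decide (v ≠ 0)) : Int) + xs.length := by
  induction xs generalizing d t c with
  | nil => exact ⟨hrel, hnd, by simp⟩
  | cons y ys ih =>
    obtain ⟨h1, h2, h3⟩ := stepAB d t y c hrel hnd
    obtain ⟨g1, g2, g3⟩ := ih (touchA (d, t) y).1 (touchA (d, t) y).2 (incB c y) h1 h2
    simp only [Prod.mk.eta] at g1 g2 g3
    refine ⟨by simpa using g1, by simpa using g2, ?_⟩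
    simp only [List.foldl_cons, List.length_cons]
    push_cast
    omega

-- A's second loop selects min(needed, #nonzero values)
lemma loopA (vs : List Int) (needed ans : Int) (h : 0 ≤ needed) :
    (vs.foldl (fun (s : Int × Int) v => if 0 < s.1 ∧ v ≠ 0 then (s.1 - 1, s.2 + 1) else s)
      (needed, ans)).2
    = ans + min needed (vs.countP (fun v => decide (v ≠ 0)) : Int) := by
  induction vs generalizing needed ans with
  | nil => simp; omega
  | cons v rest ih =>
    simp only [List.foldl_cons, List.countP_cons]
    by_cases hv : v ≠ 0
    · by_cases hn : 0 < needed
      · rw [if_pos ⟨hn, hv⟩, ih (needed - 1) (ans + 1) (by omega)]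
        simp [hv]
        omega
      · rw [if_neg (by tauto), ih needed ans h]
        simp [hv]
        omega
    · rw [if_neg (by tauto), ih needed ans h]
      simp [hv]

-- ===== VERDICT (by name: the statement is the Claim_ definition above) =====
theorem solution_spec : Claim_equal_solution := by
  intro boxes _
  unfold Spec_solution solution solution_alt
  simp only []
  rw [pairFold touchA boxes (PySem.Dict.empty, (0 : Int)), pairFold incB boxes PySem.Dict.empty]
  obtain ⟨h1, h2, h3⟩ := invAB (boxes.flatMap (fun p => [p.1, p.2])) PySem.Dict.empty 0
    PySem.Dict.empty rfl PySem.Dict.nodup_keys_empty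
  set xs := boxes.flatMap (fun p => [p.1, p.2]) with hxs
  set S := xs.foldl touchA (PySem.Dict.empty, (0 : Int)) with hSdef
  set C := xs.foldl incB PySem.Dict.empty with hCdef
  -- A's flag dict holds B's counts mod 2
  have hvals : S.1.values = C.values.map (fun v => PySem.Int.mod v 2) := by
    simp only [PySem.Dict.values]
    rw [h1, List.map_map, List.map_map]
    rfl
  -- nonzero flags are exactly odd counts
  have hcongr : S.1.values.countP (fun v => decide (v ≠ 0))
      = C.values.countP (fun v => decide (PySem.Int.mod v 2 = 1)) := by
    rw [hvals, List.countP_map]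
    refine List.countP_congr ?_
    intro v _
    have h0 : 0 ≤ PySem.Int.mod v 2 := PySem.Int.mod_nonneg v (by omega)
    have hl : PySem.Int.mod v 2 < 2 := PySem.Int.mod_lt v (by omega)
    simp only [Function.comp_apply, decide_eq_true_eq]
    constructor <;> intro h <;> omega
  have hlen : (xs.length : Int) = 2 * (boxes.length : Int) := by
    rw [hxs, length_flatMap_pair]
    push_cast
    ring
  have hO2 : 2 * S.2 + (S.1.values.countP (fun v => decide (v ≠ 0)) : Int)
      = 2 * (boxes.length : Int) := by
    rw [h3, ← hlen]
    simp [PySem.Dict.values]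
  have hneed : 0 ≤ (boxes.length : Int) - S.2 := by omega
  rw [loopA S.1.values ((boxes.length : Int) - S.2) 0 hneed,
    PySem.List.foldl_ite_add_one (fun c => PySem.Int.mod c 2 = 1) C.values 0,
    PySem.Int.floordiv_eq_ediv_of_pos (by omega : (0:Int) < 2)]
  rw [← hcongr]
  omega
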